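-- pv_equiv track=rewrite | github.com/cs-learning-2019/CCCsat | Lessons/Term1/J5_2020.py | getListOfGoodCells
-- ===== SOURCE A (Python) =====
-- def getListOfGoodCells(cellNum, M, N):
--     goodCells = []
--     for r in range(1, cellNum + 1):
--         if cellNum % r == 0:
--             c = cellNum // r
--             if r <= M and c <= N:
--                 goodCells.append((r, c))
--     return goodCells
-- ===== SOURCE B (Python) =====
-- def getListOfGoodCells(cellNum, M, N):
--     small = []
--     large = []
--     d = 1
--     while d * d <= cellNum:
--         if cellNum % d == 0:
--             small.append(d)
--             c = cellNum // d
--             if c != d: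
--                 large.append(c)
--         d += 1
--     return [(r, cellNum // r) for r in small + large[::-1] if r <= M and cellNum // r <= N]
-- ===== Notes on version B (the rewrite author's own statement) =====
-- stated objective: faster
-- what changed: Instead of testing every r in 1..cellNum, B enumerates divisors only up to sqrt(cellNum) (collecting each small divisor and its cofactor) and emits the cofactors in reverse to reproduce A's ascending order exactly.
import Mathlib
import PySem

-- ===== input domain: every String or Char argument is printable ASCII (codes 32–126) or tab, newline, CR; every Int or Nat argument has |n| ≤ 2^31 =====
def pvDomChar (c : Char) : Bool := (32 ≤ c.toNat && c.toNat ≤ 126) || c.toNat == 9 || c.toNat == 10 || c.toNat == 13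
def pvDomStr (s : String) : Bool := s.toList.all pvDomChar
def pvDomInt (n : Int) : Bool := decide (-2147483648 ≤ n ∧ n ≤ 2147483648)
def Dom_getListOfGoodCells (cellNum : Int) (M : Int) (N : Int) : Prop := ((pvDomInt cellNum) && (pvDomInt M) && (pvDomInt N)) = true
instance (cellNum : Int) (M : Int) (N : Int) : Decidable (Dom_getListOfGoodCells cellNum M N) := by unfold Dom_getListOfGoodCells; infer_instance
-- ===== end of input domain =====

-- B replaces A's O(cellNum) scan of every candidate row by an O(sqrt(cellNum)) divisor-pair
-- enumeration (small divisors ascending, cofactors appended in reverse); same exact output.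

-- ===== PORT A =====
-- literal port of A: for r in range(1, cellNum+1): if cellNum % r == 0: c = cellNum // r; if r<=M and c<=N: append (r,c)
def getListOfGoodCells (cellNum : Int) (M : Int) (N : Int) : List (Int × Int) :=
  (PySem.List.pyRange 1 (cellNum + 1) 1).foldl
    (fun goodCells r =>
      if PySem.Int.mod cellNum r = 0 then
        let c := PySem.Int.floordiv cellNum r
        if r ≤ M ∧ c ≤ N then goodCells ++ [(r, c)] else goodCells
      else goodCells)
    []

-- ===== PORT B =====
-- the 'while d * d <= cellNum' loop of Source B; fuel cellNum.toNat + 1 only makes it total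
-- (the loop runs at most cellNum iterations since d*d ≤ cellNum forces d ≤ cellNum).
def pvAltLoop (cellNum : Int) (d : Int) (small : List Int) (large : List Int) :
    Nat → List Int × List Int
  | 0 => (small, large)
  | fuel + 1 =>
    if d * d ≤ cellNum then
      if PySem.Int.mod cellNum d = 0 then
        let c := PySem.Int.floordiv cellNum d
        pvAltLoop cellNum (d + 1) (small ++ [d]) (if c ≠ d then large ++ [c] else large) fuel
      else
        pvAltLoop cellNum (d + 1) small large fuel
    else (small, large)

-- literal port of Source B; 'large[::-1]' is List.reverse (exact), the comprehension is a filterMap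
def getListOfGoodCells_alt (cellNum : Int) (M : Int) (N : Int) : List (Int × Int) :=
  let p := pvAltLoop cellNum 1 [] [] (cellNum.toNat + 1)
  (p.1 ++ p.2.reverse).filterMap
    (fun r =>
      if r ≤ M ∧ PySem.Int.floordiv cellNum r ≤ N then
        some (r, PySem.Int.floordiv cellNum r)
      else none)

-- ===== PRECONDITION & SPEC =====
def Spec_getListOfGoodCells (cellNum : Int) (M : Int) (N : Int) (out : List (Int × Int)) : Prop := out = getListOfGoodCells_alt cellNum M N
instance (cellNum : Int) (M : Int) (N : Int) (out : List (Int × Int)) : Decidable (Spec_getListOfGoodCells cellNum M N out) := by unfold Spec_getListOfGoodCells; infer_instance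

-- ===== CLAIM (what is proved, stated in full; the proofs are below) =====
def Claim_equal_getListOfGoodCells : Prop := ∀ (cellNum : Int) (M : Int) (N : Int), Dom_getListOfGoodCells cellNum M N → Spec_getListOfGoodCells cellNum M N (getListOfGoodCells cellNum M N)

-- ===== LEMMAS AND PROOFS =====

-- K n = isqrt(max n 0), as an Int
def pvK (n : Int) : Int := (Nat.sqrt n.toNat : Int)

-- the ascending list of positive divisors of n (as A's range scan meets them)
def pvDivL (n : Int) : List Int :=
  (PySem.List.pyRange 1 (n + 1) 1).filter (fun r => decide (PySem.Int.mod n r = 0))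

-- the small-divisor list and the cofactor list the B loop builds
def pvSm (n : Int) : List Int :=
  (PySem.List.pyRange 1 (pvK n + 1) 1).filter (fun e => decide (PySem.Int.mod n e = 0))

def pvLg (n : Int) : List Int :=
  ((PySem.List.pyRange 1 (pvK n + 1) 1).filter
      (fun e => decide (PySem.Int.mod n e = 0 ∧ PySem.Int.floordiv n e ≠ e))).map
    (fun e => PySem.Int.floordiv n e)

lemma pv_sq_le_iff (n d : Int) (hd : 1 ≤ d) : d * d ≤ n ↔ d ≤ pvK n := by
  unfold pvK
  by_cases hn : 0 ≤ n
  · have hdn : d = (d.toNat : Int) := by omega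
    have hnn : n = (n.toNat : Int) := by omega
    rw [hdn, hnn]
    constructor
    · intro h
      exact_mod_cast Nat.le_sqrt.mpr (by exact_mod_cast h)
    · intro h
      exact_mod_cast Nat.le_sqrt.mp (by exact_mod_cast h)
  · have h0 : n.toNat = 0 := by omega
    rw [h0]
    constructor
    · intro h; nlinarith
    · intro h; simp [Nat.sqrt] at h; omega

lemma pv_K_nonneg (n : Int) : 0 ≤ pvK n := by unfold pvK; positivity

lemma pv_K_lt (n : Int) : n < (pvK n + 1) * (pvK n + 1) := by
  by_cases hn : 0 ≤ n
  · have h := Nat.lt_succ_sqrt n.toNat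
    unfold pvK
    have hnn : n = (n.toNat : Int) := by omega
    rw [hnn]; exact_mod_cast h
  · have := pv_K_nonneg n; nlinarith [pv_K_nonneg n]

-- exact division facts for a positive divisor e ∣ n, in PySem vocabulary
lemma pv_fd (n e : Int) (he : 0 < e) : PySem.Int.floordiv n e = n / e :=
  PySem.Int.floordiv_eq_ediv_of_pos he

lemma pv_loop_spec' (n : Int) (fuel : Nat) : ∀ (d : Int) (s l : List Int),
    1 ≤ d → (pvK n + 1 - d).toNat ≤ fuel →
    pvAltLoop n d s l fuel =
      (s ++ (PySem.List.pyRange d (pvK n + 1) 1).filter (fun e => decide (PySem.Int.mod n e = 0)),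
       l ++ ((PySem.List.pyRange d (pvK n + 1) 1).filter
              (fun e => decide (PySem.Int.mod n e = 0 ∧ PySem.Int.floordiv n e ≠ e))).map
            (fun e => PySem.Int.floordiv n e)) := by
  induction fuel with
  | zero =>
    intro d s l hd hf
    rw [PySem.List.pyRange_one_eq_nil (by omega)]
    simp [pvAltLoop]
  | succ fuel ih =>
    intro d s l hd hf
    rw [pvAltLoop]
    by_cases h : d * d ≤ n
    · have hdk : d ≤ pvK n := (pv_sq_le_iff n d hd).mp h
      rw [if_pos h]
      have hcons : PySem.List.pyRange d (pvK n + 1) 1 =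
          d :: PySem.List.pyRange (d + 1) (pvK n + 1) 1 :=
        PySem.List.pyRange_one_cons (by omega)
      by_cases hm : PySem.Int.mod n d = 0
      · rw [if_pos hm, ih (d + 1) _ _ (by omega) (by omega), hcons]
        by_cases hc : PySem.Int.floordiv n d ≠ d
        · simp [hm, hc]
        · simp [hm, hc]
      · rw [if_neg hm, ih (d + 1) _ _ (by omega) (by omega), hcons]
        simp [hm]
    · have hkd : pvK n < d := by
        by_contra hh; push Not at hh; exact h ((pv_sq_le_iff n d hd).mpr hh)
      rw [if_neg h, PySem.List.pyRange_one_eq_nil (by omega)]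
      simp

lemma pv_loop_top (n : Int) :
    pvAltLoop n 1 [] [] (n.toNat + 1) = (pvSm n, pvLg n) := by
  have hK : (pvK n).toNat ≤ n.toNat := by
    unfold pvK
    have := Nat.sqrt_le_self n.toNat
    omega
  rw [pv_loop_spec' n (n.toNat + 1) 1 [] [] (by omega) (by omega)]
  simp [pvSm, pvLg]

lemma pv_filterMap_eq (l : List Int) (q : Int → Prop) [DecidablePred q] (f : Int → Int × Int) :
    l.filterMap (fun r => if q r then some (f r) else none) =
      (l.filter (fun r => decide (q r))).map f := by
  induction l with
  | nil => rfl
  | cons a t ih => by_cases h : q a <;> simp [h, ih]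

-- membership of the two divisor lists agrees
lemma pv_mem_iff (n r : Int) : r ∈ pvSm n ++ (pvLg n).reverse ↔ r ∈ pvDivL n := by
  have hKlt := pv_K_lt n
  have hK0 := pv_K_nonneg n
  simp only [pvSm, pvLg, pvDivL, List.mem_append, List.mem_reverse, List.mem_map,
    List.mem_filter, PySem.List.mem_pyRange_one, decide_eq_true_eq,
    PySem.Int.mod_eq_zero_iff_dvd]
  constructor
  · rintro (⟨⟨h1, h2⟩, hdvd⟩ | ⟨e, ⟨⟨he1, he2⟩, hedvd, hene⟩, rfl⟩)
    · have hrr : r * r ≤ n := (pv_sq_le_iff n r h1).mpr (by omega)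
      exact ⟨⟨h1, by nlinarith⟩, hdvd⟩
    · obtain ⟨c, hc⟩ := hedvd
      have hfd : PySem.Int.floordiv n e = c := by
        rw [pv_fd n e (by omega), hc]; exact Int.mul_ediv_cancel_left c (by omega)
      rw [hfd]
      have hee : e * e ≤ n := (pv_sq_le_iff n e he1).mpr (by omega)
      have hc1 : 1 ≤ c := by nlinarith
      exact ⟨⟨hc1, by nlinarith⟩, ⟨e, by rw [hc]; ring⟩⟩
  · rintro ⟨⟨h1, h2⟩, hdvd⟩
    have hn1 : 1 ≤ n := by omega
    by_cases hrk : r ≤ pvK n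
    · exact Or.inl ⟨⟨h1, by omega⟩, hdvd⟩
    · push Not at hrk
      obtain ⟨c, hc⟩ := hdvd
      have hc1 : 1 ≤ c := by nlinarith
      have hr1 : pvK n + 1 ≤ r := by omega
      have hrr : n < r * r := by nlinarith
      have hcr : c < r := by nlinarith
      have hcc : c * c ≤ n := by nlinarith
      have hck : c ≤ pvK n := (pv_sq_le_iff n c hc1).mp hcc
      have hfc : PySem.Int.floordiv n c = r := by
        rw [pv_fd n c (by omega), hc]; exact Int.mul_ediv_cancel r (by omega)
      refine Or.inr ⟨c, ⟨⟨hc1, by omega⟩, ⟨r, by rw [hc]; ring⟩, ?_⟩, hfc⟩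
      rw [hfc]; omega

lemma pv_pairwise_divL (n : Int) : (pvDivL n).Pairwise (· < ·) :=
  List.Pairwise.sublist List.filter_sublist (PySem.List.pairwise_lt_pyRange_one _ _)

lemma pv_pairwise_B (n : Int) : (pvSm n ++ (pvLg n).reverse).Pairwise (· < ·) := by
  have hK0 := pv_K_nonneg n
  rw [List.pairwise_append]
  refine ⟨List.Pairwise.sublist List.filter_sublist (PySem.List.pairwise_lt_pyRange_one _ _),
    ?_, ?_⟩
  · rw [List.pairwise_reverse]
    unfold pvLg
    rw [List.pairwise_map]
    refine List.Pairwise.imp_of_mem ?_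
      (List.Pairwise.sublist List.filter_sublist (PySem.List.pairwise_lt_pyRange_one _ _))
    intro a b ha hb hab
    simp only [List.mem_filter, PySem.List.mem_pyRange_one, decide_eq_true_eq,
      PySem.Int.mod_eq_zero_iff_dvd] at ha hb
    obtain ⟨⟨ha1, ha2⟩, ⟨x, hx⟩, _⟩ := ha
    obtain ⟨⟨hb1, hb2⟩, ⟨y, hy⟩, _⟩ := hb
    have hA : PySem.Int.floordiv n a = x := by
      rw [pv_fd n a (by omega), hx]; exact Int.mul_ediv_cancel_left x (by omega)
    have hB : PySem.Int.floordiv n b = y := by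
      rw [pv_fd n b (by omega), hy]; exact Int.mul_ediv_cancel_left y (by omega)
    rw [hA, hB]
    have hee : a * a ≤ n := (pv_sq_le_iff n a ha1).mpr (by omega)
    have hx1 : 1 ≤ x := by nlinarith
    have hy1 : 1 ≤ y := by nlinarith
    nlinarith [hx ▸ hy]
  · intro a ha b hb
    rw [List.mem_reverse] at hb
    simp only [pvSm, pvLg, List.mem_map, List.mem_filter, PySem.List.mem_pyRange_one,
      decide_eq_true_eq, PySem.Int.mod_eq_zero_iff_dvd] at ha hb
    obtain ⟨⟨ha1, ha2⟩, _⟩ := ha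
    obtain ⟨e, ⟨⟨he1, he2⟩, ⟨c, hc⟩, hene⟩, rfl⟩ := hb
    have hfd : PySem.Int.floordiv n e = c := by
      rw [pv_fd n e (by omega), hc]; exact Int.mul_ediv_cancel_left c (by omega)
    rw [hfd] at hene ⊢
    have hee : e * e ≤ n := (pv_sq_le_iff n e he1).mpr (by omega)
    have hc1 : 1 ≤ c := by nlinarith
    have hce : e < c := by
      by_cases h : e < c
      · exact h
      · push Not at h
        exfalso
        exact hene (mul_left_cancel₀ (show (e : Int) ≠ 0 by omega) (by nlinarith))
    have hcc : n < c * c := by nlinarith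
    have hcK : pvK n < c := by
      by_contra hh
      push Not at hh
      have := (pv_sq_le_iff n c hc1).mpr hh
      omega
    omega

lemma pv_main (n : Int) : pvSm n ++ (pvLg n).reverse = pvDivL n := by
  have h1 := pv_pairwise_divL n
  have h2 := pv_pairwise_B n
  have hperm : (pvSm n ++ (pvLg n).reverse).Perm (pvDivL n) :=
    (List.perm_ext_iff_of_nodup (h2.imp fun h => ne_of_lt h)
      (h1.imp fun h => ne_of_lt h)).mpr (pv_mem_iff n)
  calc pvSm n ++ (pvLg n).reverse
      = PySem.List.sorted (pvDivL n) (fun x => x) :=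
        (PySem.List.sorted_eq_of_perm_of_pairwise_lt (pvDivL n) _ (fun x => x) hperm h2).symm
    _ = pvDivL n :=
        PySem.List.sorted_eq_of_perm_of_pairwise_lt (pvDivL n) (pvDivL n) (fun x => x)
          (List.Perm.refl _) h1

theorem pv_equal (cellNum M N : Int) :
    getListOfGoodCells cellNum M N = getListOfGoodCells_alt cellNum M N := by
  unfold getListOfGoodCells getListOfGoodCells_alt
  rw [pv_loop_top]
  rw [PySem.List.foldl_congr_mem _ _
    (fun acc r => if PySem.Int.mod cellNum r = 0 ∧ (r ≤ M ∧ PySem.Int.floordiv cellNum r ≤ N)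
      then acc ++ [(r, PySem.Int.floordiv cellNum r)] else acc) _
    (by
      intro acc r _
      by_cases h1 : PySem.Int.mod cellNum r = 0 <;>
        by_cases h2 : r ≤ M ∧ PySem.Int.floordiv cellNum r ≤ N <;>
          simp [h1, h2])]
  rw [PySem.List.foldl_append_ite
    (fun r => PySem.Int.mod cellNum r = 0 ∧ (r ≤ M ∧ PySem.Int.floordiv cellNum r ≤ N))
    (fun r => (r, PySem.Int.floordiv cellNum r))]
  rw [pv_filterMap_eq _ (fun r => r ≤ M ∧ PySem.Int.floordiv cellNum r ≤ N)]
  show _ = ((pvSm cellNum ++ (pvLg cellNum).reverse).filter _).map _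
  rw [pv_main]
  unfold pvDivL
  rw [List.filter_filter]
  simp only [List.nil_append]
  rw [List.filter_congr (fun x _ => rfl)]
  congr 1
  apply List.filter_congr
  intro x _
  by_cases h1 : PySem.Int.mod cellNum x = 0 <;>
    by_cases h2 : x ≤ M ∧ PySem.Int.floordiv cellNum x ≤ N <;> simp [h1, h2]

-- ===== VERDICT (by name: the statement is the Claim_ definition above) =====
theorem getListOfGoodCells_spec : Claim_equal_getListOfGoodCells := by
  intro cellNum M N _
  exact pv_equal cellNum M N
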